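-- pv_equiv track=rewrite | github.com/AsafFitusi/intro-to-cs | מטלה רביעית/poly_matrix.py | matrix_polynom
-- ===== SOURCE A (Python) =====
-- def matrix_scalar_mult(A, c):#This function that creates a matrix multiplied by a scalar.
--     Ac = [[e * c for e in row] for row in A]
--     return Ac
--
-- def matrix_add(A, B):#This function that adds two matrices.
--     AsumB = [[A[i][j] + B[i][j] for j in range(len(A[0]))] for i in range(len(A))]
--     return AsumB
--
-- def matrix_mult(A, B):#This function that multiplies two matrices.
--     AmultB = [[sum(A[i][k] * B[k][j] for k in range(len(A[0]))) for j in range(len(B[0]))] for i in range(len(A))]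
--     return AmultB
--
-- def identity_matrix(n):#This function that creates the identity matrix.
--     In = [[1 if i == j else 0 for j in range(n)] for i in range(n)]
--     return In
--
-- def matrix_polynom(A, p):#This function that calculates the polynomial of a matrix.
--     emy_mat = [[0 for j in range(len(A[0]))] for i in range(len(A))]
--     result = emy_mat
--     for i in range(len(p)):#Iterate over the polynomial coefficients.
--         if i == 0:
--             Ip = identity_matrix(len(A))
--             I_scalar_p = matrix_scalar_mult(Ip, p[i])
--             result = matrix_add(result, I_scalar_p)
--         elif i == 1:
--             As = matrix_scalar_mult(A, p[i])
--             result = matrix_add(result, As)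
--         else:
--             A_mult = A
--             for j in range(i - 1):#Multiply A by itself (i-1) times.
--                 A_mult = matrix_mult(A_mult, A)
--             A_mult_scaled = matrix_scalar_mult(A_mult, p[i])
--             result = matrix_add(result, A_mult_scaled)
--     return result
-- ===== SOURCE B (Python) =====
-- def matrix_mult(A, B):
--     AmultB = [[sum(A[i][k] * B[k][j] for k in range(len(A[0]))) for j in range(len(B[0]))] for i in range(len(A))]
--     return AmultB
--
-- def matrix_polynom(A, p):
--     # Single pass with an accumulated power of A: one matrix multiplication
--     # per coefficient instead of recomputing A^i from scratch each time.
--     n, m = len(A), (len(A[0]) if A else 0)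
--     result = [[0] * m for _ in range(n)]
--     P = A
--     for i, c in enumerate(p):
--         if i == 0:
--             result = [[result[r][t] + (c if r == t else 0) for t in range(m)]
--                       for r in range(n)]
--         else:
--             if i >= 2:
--                 P = matrix_mult(P, A)
--             result = [[result[r][t] + c * P[r][t] for t in range(m)]
--                       for r in range(n)]
--     return result
-- ===== Notes on version B (the rewrite author's own statement) =====
-- stated objective: faster
-- what changed: B makes a single pass over the coefficients maintaining an accumulated power of A (one matrix multiplication per coefficient) instead of A's recomputation of A^i from scratch for every coefficient.
import Mathlib
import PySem

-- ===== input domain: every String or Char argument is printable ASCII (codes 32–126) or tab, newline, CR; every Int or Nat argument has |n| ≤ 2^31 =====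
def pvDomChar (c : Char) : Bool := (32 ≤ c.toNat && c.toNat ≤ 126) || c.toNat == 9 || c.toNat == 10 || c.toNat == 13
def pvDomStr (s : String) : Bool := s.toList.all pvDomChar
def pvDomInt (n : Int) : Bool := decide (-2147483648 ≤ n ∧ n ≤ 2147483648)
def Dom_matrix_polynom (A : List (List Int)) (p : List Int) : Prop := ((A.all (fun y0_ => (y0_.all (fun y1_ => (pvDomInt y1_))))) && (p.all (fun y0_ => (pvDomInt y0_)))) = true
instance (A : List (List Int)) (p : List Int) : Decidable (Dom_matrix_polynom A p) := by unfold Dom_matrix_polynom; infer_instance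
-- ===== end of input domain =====

-- B replaces A's per-coefficient recomputation of A^i (O(d^2) matrix products)
-- by a single pass that accumulates the power of A (O(d) matrix products); faster.

-- ===== PORT A =====
def matrix_scalar_mult (X : List (List Int)) (c : Int) : List (List Int) :=
  X.map (fun row => row.map (fun e => e * c))

def matrix_add (X Y : List (List Int)) : List (List Int) :=
  (List.range X.length).map (fun i =>
    (List.range (X.headD []).length).map (fun j =>
      (X.getD i []).getD j 0 + (Y.getD i []).getD j 0))

def matrix_mult (X Y : List (List Int)) : List (List Int) :=
  (List.range X.length).map (fun i =>
    (List.range (Y.headD []).length).map (fun j =>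
      ((List.range (X.headD []).length).map (fun k =>
        (X.getD i []).getD k 0 * (Y.getD k []).getD j 0)).sum))

def identity_matrix (n : Nat) : List (List Int) :=
  (List.range n).map (fun i => (List.range n).map (fun j => if i = j then (1:Int) else 0))

def matrix_polynom (A : List (List Int)) (p : List Int) : List (List Int) :=
  let emy := (List.range A.length).map (fun _ =>
    (List.range (A.headD []).length).map (fun _ => (0:Int)))
  (List.range p.length).foldl (fun result i =>
    if i = 0 then
      matrix_add result (matrix_scalar_mult (identity_matrix A.length) (p.getD i 0))
    else if i = 1 then
      matrix_add result (matrix_scalar_mult A (p.getD i 0))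
    else
      matrix_add result (matrix_scalar_mult
        ((List.range (i - 1)).foldl (fun A_mult _ => matrix_mult A_mult A) A)
        (p.getD i 0))) emy

-- ===== PORT B =====
def mpAltLoop (A : List (List Int)) (n m : Nat) (i : Nat)
    (result P : List (List Int)) : List Int → List (List Int)
  | [] => result
  | c :: rest =>
    if i = 0 then
      mpAltLoop A n m (i + 1)
        ((List.range n).map (fun r => (List.range m).map (fun t =>
          (result.getD r []).getD t 0 + (if r = t then c else 0)))) P rest
    else
      mpAltLoop A n m (i + 1)
        ((List.range n).map (fun r => (List.range m).map (fun t =>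
          (result.getD r []).getD t 0 +
            c * (((if 2 ≤ i then matrix_mult P A else P).getD r []).getD t 0))))
        (if 2 ≤ i then matrix_mult P A else P) rest

def matrix_polynom_alt (A : List (List Int)) (p : List Int) : List (List Int) :=
  mpAltLoop A A.length (A.headD []).length 0
    ((List.range A.length).map (fun _ =>
      (List.range (A.headD []).length).map (fun _ => (0:Int)))) A p

-- ===== PRECONDITION & SPEC =====
-- Pre_ is exactly the set of inputs on which the Python A returns normally: A raises
-- IndexError when p ≠ [] and A has more columns than rows (the identity-matrix add),
-- or when len(p) ≥ 2 and some row of A is shorter than row 0 (truncated row access).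
def Pre_matrix_polynom (A : List (List Int)) (p : List Int) : Prop :=
  p = [] ∨ ((A.headD []).length ≤ A.length ∧
    (2 ≤ p.length → ∀ row ∈ A, (A.headD []).length ≤ row.length))
instance (A : List (List Int)) (p : List Int) : Decidable (Pre_matrix_polynom A p) := by
  unfold Pre_matrix_polynom; infer_instance

def pvWitness_matrix_polynom : List (List Int) × List Int := ([[1, 2], [3, 4]], [2, -1, 3])

def Spec_matrix_polynom (A : List (List Int)) (p : List Int) (out : List (List Int)) : Prop := out = matrix_polynom_alt A p
instance (A : List (List Int)) (p : List Int) (out : List (List Int)) : Decidable (Spec_matrix_polynom A p out) := by unfold Spec_matrix_polynom; infer_instance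

-- ===== CLAIM (what is proved, stated in full; the proofs are below) =====
def Claim_equal_matrix_polynom : Prop := ∀ (A : List (List Int)) (p : List Int), Dom_matrix_polynom A p → Pre_matrix_polynom A p → Spec_matrix_polynom A p (matrix_polynom A p)

-- ===== LEMMAS AND PROOFS =====

def mkM (n m : Nat) (f : Nat → Nat → Int) : List (List Int) :=
  (List.range n).map (fun r => (List.range m).map (fun t => f r t))

def pe (X : List (List Int)) (r t : Nat) : Int := (X.getD r []).getD t 0

def powA (A : List (List Int)) (k : Nat) : List (List Int) :=
  (List.range k).foldl (fun M _ => matrix_mult M A) A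

theorem pe_mkM {n m : Nat} {f : Nat → Nat → Int} {r t : Nat} (hr : r < n) (ht : t < m) :
    pe (mkM n m f) r t = f r t := by
  simp [pe, mkM, List.getD_eq_getElem?_getD, List.getElem?_range, hr, ht]

theorem mkM_congr {n m : Nat} {f g : Nat → Nat → Int}
    (h : ∀ r < n, ∀ t < m, f r t = g r t) : mkM n m f = mkM n m g := by
  unfold mkM
  refine List.map_congr_left (fun r hr => ?_)
  refine List.map_congr_left (fun t ht => ?_)
  exact h r (List.mem_range.mp hr) t (List.mem_range.mp ht)

theorem pe_smul (X : List (List Int)) (c : Int) (r t : Nat) :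
    pe (matrix_scalar_mult X c) r t = pe X r t * c := by
  unfold pe matrix_scalar_mult
  rcases h : X[r]? with _ | row <;>
    simp [List.getD_eq_getElem?_getD, h] <;>
    rcases h2 : row[t]? with _ | e <;> simp [h2]

theorem pe_idm {n : Nat} {r : Nat} (t : Nat) (hr : r < n) :
    pe (identity_matrix n) r t = if r = t then 1 else 0 := by
  unfold pe identity_matrix
  by_cases ht : t < n
  · simp [List.getD_eq_getElem?_getD, List.getElem?_range, hr, ht]
  · have hne : r ≠ t := by omega
    have hnone : (List.range n)[t]? = none := by
      rw [List.getElem?_eq_none]; simpa using Nat.le_of_not_lt ht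
    simp [List.getD_eq_getElem?_getD, hr, hnone, hne]

theorem madd_mkM (n m : Nat) (f : Nat → Nat → Int) (Y : List (List Int)) :
    matrix_add (mkM n m f) Y = mkM n m (fun r t => f r t + pe Y r t) := by
  rcases Nat.eq_zero_or_pos n with h0 | hpos
  · subst h0; simp [matrix_add, mkM]
  · have hlen : (mkM n m f).length = n := by simp [mkM]
    have hhead : (mkM n m f).headD [] = (List.range m).map (fun t => f 0 t) := by
      rcases n with _ | n'
      · omega
      · simp [mkM, List.range_succ_eq_map]
    unfold matrix_add
    rw [hlen, hhead]
    simp only [List.length_map, List.length_range]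
    refine List.map_congr_left (fun r hr => ?_)
    refine List.map_congr_left (fun t ht => ?_)
    have hr' := List.mem_range.mp hr
    have ht' := List.mem_range.mp ht
    have : ((mkM n m f).getD r []).getD t 0 = f r t := pe_mkM hr' ht'
    simpa [pe] using congrArg (· + (Y.getD r []).getD t 0) this

theorem powA_succ (A : List (List Int)) (k : Nat) :
    powA A (k + 1) = matrix_mult (powA A k) A := by
  simp [powA, List.range_succ]

-- the tail of the two loops (indices ≥ 2) computes the same matrix
theorem tail_eq (A : List (List Int)) (p : List Int) (q : List Int) :
    ∀ (i : Nat) (f : Nat → Nat → Int), 2 ≤ i → (∀ j, q.getD j 0 = p.getD (i + j) 0) →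
    List.foldl (fun result k =>
      if k = 0 then
        matrix_add result (matrix_scalar_mult (identity_matrix A.length) (p.getD k 0))
      else if k = 1 then
        matrix_add result (matrix_scalar_mult A (p.getD k 0))
      else
        matrix_add result (matrix_scalar_mult
          ((List.range (k - 1)).foldl (fun A_mult _ => matrix_mult A_mult A) A)
          (p.getD k 0)))
      (mkM A.length (A.headD []).length f) (List.range' i q.length)
    = mpAltLoop A A.length (A.headD []).length i
        (mkM A.length (A.headD []).length f) (powA A (i - 2)) q := by
  induction q with
  | nil => intro i f _ _; simp [mpAltLoop]
  | cons c rest ih =>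
    intro i f h2 hq
    have hi0 : ¬ i = 0 := by omega
    have hi1 : ¬ i = 1 := by omega
    have hc : p.getD i 0 = c := by
      have := hq 0; simpa using this.symm
    have hpow : matrix_mult (powA A (i - 2)) A = powA A (i - 1) := by
      have : i - 1 = (i - 2) + 1 := by omega
      rw [this, powA_succ]
    have hfold : (List.range (i - 1)).foldl (fun A_mult _ => matrix_mult A_mult A) A
        = powA A (i - 1) := rfl
    have step :
        matrix_add (mkM A.length (A.headD []).length f)
          (matrix_scalar_mult (powA A (i - 1)) c)
        = mkM A.length (A.headD []).length
            (fun r t => f r t + c * pe (powA A (i - 1)) r t) := by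
      rw [madd_mkM]
      exact mkM_congr (fun r _ t _ => by rw [pe_smul]; ring)
    have stepB :
        ((List.range A.length).map (fun r => (List.range (A.headD []).length).map (fun t =>
          ((mkM A.length (A.headD []).length f).getD r []).getD t 0 +
            c * ((powA A (i - 1)).getD r []).getD t 0)))
        = mkM A.length (A.headD []).length
            (fun r t => f r t + c * pe (powA A (i - 1)) r t) := by
      refine mkM_congr (fun r hr t ht => ?_)
      rw [show ((mkM A.length (A.headD []).length f).getD r []).getD t 0
            = pe (mkM A.length (A.headD []).length f) r t from rfl, pe_mkM hr ht]
      rfl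
    rw [List.length_cons, List.range'_succ, List.foldl_cons]
    simp only [hi0, hi1, if_false, hc, hfold, step]
    rw [mpAltLoop]
    simp only [hi0, if_false, if_pos h2, hpow, stepB]
    have h2' : 2 ≤ i + 1 := by omega
    have hq' : ∀ j, rest.getD j 0 = p.getD (i + 1 + j) 0 := by
      intro j
      have := hq (j + 1)
      simpa [Nat.add_assoc, Nat.add_comm 1 j] using this
    have hi2 : i + 1 - 2 = i - 1 := by omega
    have := ih (i + 1) (fun r t => f r t + c * pe (powA A (i - 1)) r t) h2' hq'
    rw [hi2] at this
    exact this

theorem ports_eq (A : List (List Int)) (p : List Int) :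
    matrix_polynom A p = matrix_polynom_alt A p := by
  unfold matrix_polynom matrix_polynom_alt
  have hemy : ((List.range A.length).map (fun _ =>
      (List.range (A.headD []).length).map (fun _ => (0:Int))))
      = mkM A.length (A.headD []).length (fun _ _ => 0) := rfl
  rcases p with _ | ⟨c0, rest⟩
  · simp [mpAltLoop]
  · -- first step (index 0) on both sides
    have step0A :
        matrix_add (mkM A.length (A.headD []).length (fun _ _ => 0))
          (matrix_scalar_mult (identity_matrix A.length) c0)
        = mkM A.length (A.headD []).length (fun r t => if r = t then c0 else 0) := by
      rw [madd_mkM]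
      refine mkM_congr (fun r hr t _ => ?_)
      rw [pe_smul, pe_idm t hr]
      split_ifs <;> ring
    have step0B :
        ((List.range A.length).map (fun r => (List.range (A.headD []).length).map (fun t =>
          ((mkM A.length (A.headD []).length (fun _ _ => 0)).getD r []).getD t 0 +
            (if r = t then c0 else 0))))
        = mkM A.length (A.headD []).length (fun r t => if r = t then c0 else 0) := by
      refine mkM_congr (fun r hr t ht => ?_)
      rw [show ((mkM A.length (A.headD []).length (fun _ _ => 0)).getD r []).getD t 0
            = pe (mkM A.length (A.headD []).length (fun _ _ => 0)) r t from rfl,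
        pe_mkM hr ht]
      ring
    rcases rest with _ | ⟨c1, rest2⟩
    · -- p = [c0]
      simp only [hemy, List.length_cons, List.length_nil]
      rw [show List.range 1 = [0] from rfl, List.foldl_cons, List.foldl_nil,
        if_pos rfl, show ([c0] : List Int).getD 0 0 = c0 from rfl, step0A]
      rw [mpAltLoop, if_pos rfl, mpAltLoop, step0B]
    · -- p = c0 :: c1 :: rest2
      simp only [hemy, List.length_cons]
      rw [List.range_eq_range', List.range'_succ, List.range'_succ,
        List.foldl_cons, List.foldl_cons, show (0:Nat) + 1 = 1 from rfl]
      rw [if_pos rfl, show ((c0 :: c1 :: rest2).getD 0 0) = c0 from rfl, step0A]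
      -- second step (index 1) on the A side
      have step1A :
          matrix_add (mkM A.length (A.headD []).length (fun r t => if r = t then c0 else 0))
            (matrix_scalar_mult A c1)
          = mkM A.length (A.headD []).length
              (fun r t => (if r = t then c0 else 0) + c1 * pe A r t) := by
        rw [madd_mkM]
        exact mkM_congr (fun r _ t _ => by rw [pe_smul]; ring)
      rw [if_neg (by omega : ¬ (1:Nat) = 0), if_pos rfl,
        show ((c0 :: c1 :: rest2).getD 1 0) = c1 from rfl, step1A]
      -- the B side: two loop steps
      rw [mpAltLoop, if_pos rfl, step0B, mpAltLoop,
        if_neg (by omega : ¬ ((0:Nat) + 1) = 0),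
        if_neg (by omega : ¬ 2 ≤ (0:Nat) + 1)]
      have step1B :
          ((List.range A.length).map (fun r => (List.range (A.headD []).length).map (fun t =>
            ((mkM A.length (A.headD []).length (fun r t => if r = t then c0 else 0)).getD r []).getD t 0 +
              c1 * ((A.getD r []).getD t 0))))
          = mkM A.length (A.headD []).length
              (fun r t => (if r = t then c0 else 0) + c1 * pe A r t) := by
        refine mkM_congr (fun r hr t ht => ?_)
        rw [show ((mkM A.length (A.headD []).length (fun r t => if r = t then c0 else 0)).getD r []).getD t 0
              = pe (mkM A.length (A.headD []).length (fun r t => if r = t then c0 else 0)) r t from rfl,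
          pe_mkM hr ht]
        rfl
      rw [step1B, show (0:Nat) + 1 + 1 = 2 from rfl]
      -- the tail: indices ≥ 2
      have hq : ∀ j, rest2.getD j 0 = (c0 :: c1 :: rest2).getD (2 + j) 0 := by
        intro j; simp [List.getD, Nat.add_comm 2 j]
      have := tail_eq A (c0 :: c1 :: rest2) rest2 2
        (fun r t => (if r = t then c0 else 0) + c1 * pe A r t) (by omega) hq
      simpa [powA] using this

-- ===== VERDICT (by name: the statement is the Claim_ definition above) =====
theorem matrix_polynom_spec : Claim_equal_matrix_polynom := by
  intro A p _ _
  unfold Spec_matrix_polynom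
  exact ports_eq A p
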